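-- pv_equiv track=rewrite | github.com/matslindh/codingchallenges | knowit2020/13.py | fubarer
-- ===== SOURCE A (Python) =====
-- from collections import defaultdict
--
-- base = ord('a')
--
-- def fubarer(inp):
--     counter = defaultdict(int)
--     out = ''
--
--     for char in inp:
--         n = ord(char) - base
--
--         if n == counter[n]:
--             out += char
--
--         counter[n] += 1
--
--     return out
-- ===== SOURCE B (Python) =====
-- base = ord('a')
--
-- def fubarer(inp):
--     # Index-first gather: map each character to its ordered occurrence positions,
--     # then for each character c with n = ord(c)-base, the kept position is the
--     # (n+1)-th occurrence (positions[n]) when it exists and n >= 0; finally sort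
--     # the gathered positions to restore original order.
--     pos = {}
--     for i, c in enumerate(inp):
--         pos.setdefault(c, []).append(i)
--     keep = []
--     for c, ps in pos.items():
--         n = ord(c) - base
--         if 0 <= n < len(ps):
--             keep.append((ps[n], c))
--     keep.sort(key=lambda t: t[0])
--     return ''.join(c for _, c in keep)
-- ===== Notes on version B (the rewrite author's own statement) =====
-- stated objective: alternative
-- what changed: Replaces A's streaming running-count test by an index-first gather: one pass groups the occurrence positions of each character, then for each character the (ord(c)-base)-th occurrence position is selected directly, and the selected positions are sorted to rebuild the output.
import Mathlib
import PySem

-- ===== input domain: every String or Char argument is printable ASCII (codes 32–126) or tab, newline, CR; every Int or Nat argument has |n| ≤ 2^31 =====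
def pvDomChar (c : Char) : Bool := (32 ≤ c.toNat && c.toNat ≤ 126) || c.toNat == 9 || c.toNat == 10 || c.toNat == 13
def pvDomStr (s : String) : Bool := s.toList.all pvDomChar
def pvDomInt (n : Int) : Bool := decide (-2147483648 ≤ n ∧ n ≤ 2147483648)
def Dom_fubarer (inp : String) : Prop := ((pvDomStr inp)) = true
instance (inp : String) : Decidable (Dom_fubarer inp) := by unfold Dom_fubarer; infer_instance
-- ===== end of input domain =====

-- B replaces A's streaming running-counter test by an index-first gather: group the
-- occurrence positions of each character, pick the (ord(c)-base)-th one per character,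
-- sort the picked positions back into original order (objective: alternative).

-- ===== PORT A =====
def fubarer (inp : String) : String :=
  String.mk
    (inp.toList.foldl
      (fun (st : PySem.Dict Int Int × List Char) char =>
        let n : Int := (char.toNat : Int) - 97
        let out := if n == st.1.getD n 0 then st.2 ++ [char] else st.2
        (st.1.insert n (st.1.getD n 0 + 1), out))
      (PySem.Dict.empty, [])).2

-- ===== PORT B =====
-- pos.setdefault(c, []).append(i)  ≡  pos[c] = pos.get(c, []) + [i]  = Dict.modify;
-- ps[n] under the guard 0 ≤ n < len(ps) is always in range, so pyGetD is exact here.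
def fubarer_alt (inp : String) : String :=
  let pos : PySem.Dict Char (List Int) :=
    (PySem.List.enumerate inp.toList 0).foldl
      (fun d p => d.modify p.2 [] (· ++ [p.1])) PySem.Dict.empty
  let keep : List (Int × Char) :=
    pos.items.foldl
      (fun acc cp =>
        let n : Int := (cp.1.toNat : Int) - 97
        if 0 ≤ n ∧ n < (cp.2.length : Int) then acc ++ [(PySem.List.pyGetD cp.2 n 0, cp.1)]
        else acc)
      []
  String.mk ((PySem.List.sorted keep (fun t => t.1) false).map (·.2))

-- ===== PRECONDITION & SPEC =====
def Spec_fubarer (inp : String) (out : String) : Prop := out = fubarer_alt inp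
instance (inp : String) (out : String) : Decidable (Spec_fubarer inp out) := by unfold Spec_fubarer; infer_instance

-- ===== CLAIM (what is proved, stated in full; the proofs are below) =====
def Claim_equal_fubarer : Prop := ∀ (inp : String), Dom_fubarer inp → Spec_fubarer inp (fubarer inp)

-- ===== LEMMAS AND PROOFS =====

/-- Letter index of a character, `ord(c) - ord('a')`. -/
def pvKey (c : Char) : Int := (c.toNat : Int) - 97

/-- Occurrence positions of `c` in `l`, in order. -/
def pvOcc (l : List Char) (c : Char) : List Int :=
  ((PySem.List.enumerate l 0).filter (fun p => p.2 == c)).map (·.1)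

/-- The (position, char) pair selected for character `c` (at most one). -/
def pvSel (l : List Char) (c : Char) : List (Int × Char) :=
  if 0 ≤ pvKey c ∧ pvKey c < ((pvOcc l c).length : Int) then
    [(PySem.List.pyGetD (pvOcc l c) (pvKey c) 0, c)]
  else []

/-- Reference list of kept (position, char) pairs, in position order. -/
def pvRef (l : List Char) : List (Int × Char) :=
  (PySem.List.enumerate l 0).filter
    (fun p => ((PySem.List.slice l none (some p.1)).count p.2 : Int) == pvKey p.2)

/-- Reference recursion: chars kept from `l` given the already-seen prefix `pre`. -/
def pvGo (pre l : List Char) : List Char :=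
  match l with
  | [] => []
  | c :: l' =>
    (if ((pre.count c : Int) == (c.toNat : Int) - 97) then [c] else []) ++ pvGo (pre ++ [c]) l'

lemma pvKeyInj {c c' : Char} (h : (c.toNat : Int) - 97 = (c'.toNat : Int) - 97) : c = c' := by
  have h1 : c.toNat = c'.toNat := by omega
  exact Char.ext (UInt32.toNat_inj.mp h1)

lemma fubarerA_loop (l : List Char) : ∀ (d : PySem.Dict Int Int) (acc pre : List Char),
    (∀ c : Char, d.getD ((c.toNat : Int) - 97) 0 = (pre.count c : Int)) →
    (l.foldl
      (fun (st : PySem.Dict Int Int × List Char) char =>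
        let n : Int := (char.toNat : Int) - 97
        let out := if n == st.1.getD n 0 then st.2 ++ [char] else st.2
        (st.1.insert n (st.1.getD n 0 + 1), out))
      (d, acc)).2 = acc ++ pvGo pre l := by
  induction l with
  | nil => intro d acc pre _; simp [pvGo]
  | cons c l' ih =>
    intro d acc pre H
    simp only [List.foldl_cons]
    rw [ih _ _ (pre ++ [c]) ?_]
    · simp only [pvGo, H c]
      by_cases hc : ((pre.count c : Int) = (c.toNat : Int) - 97)
      · simp [hc]
      · have : ¬ ((c.toNat : Int) - 97 = (pre.count c : Int)) := fun h => hc h.symm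
        simp [hc, this]
    · intro c'
      rw [PySem.Dict.getD_insert]
      by_cases hk : ((c'.toNat : Int) - 97 = (c.toNat : Int) - 97)
      · have hcc : c' = c := pvKeyInj hk
        subst hcc
        simp [H c', List.count_append]
      · have hkn : ¬ c'.toNat = c.toNat := fun h => hk (by rw [h])
        have hne : ¬ c = c' := fun h => hkn (by rw [h])
        simp [hk, H c', List.count_append, hne]

lemma fubarerRef_loop (cs : List Char) (l : List Char) : ∀ (pre : List Char), cs = pre ++ l →
    ((PySem.List.enumerate l (pre.length : Int)).filter
        (fun p => ((PySem.List.slice cs none (some p.1)).count p.2 : Int) == pvKey p.2)).map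
      (·.2) = pvGo pre l := by
  induction l with
  | nil => intro pre _; simp [PySem.List.enumerate_nil, pvGo]
  | cons c l' ih =>
    intro pre hcs
    have hI := ih (pre ++ [c]) (by rw [hcs]; simp)
    have hslice : PySem.List.slice cs none (some (pre.length : Int)) = pre := by
      rw [PySem.List.slice_to_natCast, hcs, List.take_left]
    have hstep : (pre.length : Int) + 1 = ((pre ++ [c]).length : Int) := by simp
    rw [PySem.List.enumerate_cons, hstep, List.filter_cons]
    rw [apply_ite (List.map (fun x : Int × Char => x.2)), List.map_cons, hI]
    simp only [hslice, pvGo, pvKey]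
    by_cases hc : (((pre.count c : Nat) : Int) == (c.toNat : Int) - 97) = true
    · simp [hc]
    · simp [hc]

/-- Count of `c` equals the number of its occurrence positions. -/
lemma pvOcc_length (l : List Char) (c : Char) : (pvOcc l c).length = l.count c := by
  unfold pvOcc
  rw [List.length_map, ← List.countP_eq_length_filter]
  have h : List.countP ((fun x => x == c) ∘ (fun p : Int × Char => p.2)) (PySem.List.enumerate l 0)
      = l.count c := by
    rw [← List.countP_map, PySem.List.map_snd_enumerate, List.count_eq_countP]
  exact h

/-- `pvOcc` under appending one character. -/
lemma pvOcc_append (l : List Char) (x c : Char) :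
    pvOcc (l ++ [x]) c = pvOcc l c ++ (if x = c then [((l.length : Nat) : Int)] else []) := by
  unfold pvOcc
  rw [PySem.List.enumerate_append, List.filter_append, List.map_append]
  congr 1
  rw [PySem.List.enumerate_cons, PySem.List.enumerate_nil, List.filter_cons]
  by_cases h : x = c <;> simp [h]

/-- `pvRef` under appending one character. -/
lemma pvRef_append (l : List Char) (x : Char) :
    pvRef (l ++ [x]) = pvRef l ++
      (if ((l.count x : Nat) : Int) = pvKey x then [(((l.length : Nat) : Int), x)] else []) := by
  unfold pvRef
  rw [PySem.List.enumerate_append, List.filter_append]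
  congr 1
  · apply List.filter_congr
    intro p hp
    rcases (PySem.List.mem_enumerate_iff _ _ _).mp hp with ⟨k, hk, rfl⟩
    simp only [zero_add]
    rw [PySem.List.slice_to_natCast, PySem.List.slice_to_natCast,
      List.take_append_of_le_length (le_of_lt hk)]
  · rw [PySem.List.enumerate_cons, PySem.List.enumerate_nil, List.filter_cons]
    simp only [zero_add, List.filter_nil]
    rw [PySem.List.slice_to_natCast, List.take_left]
    by_cases h : ((l.count x : Nat) : Int) = pvKey x
    · simp [h]
    · simp [h]

/-- `pvSel` is unchanged for other characters. -/
lemma pvSel_append_ne (l : List Char) (x c : Char) (h : c ≠ x) :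
    pvSel (l ++ [x]) c = pvSel l c := by
  have hx : ¬ (x = c) := fun h' => h h'.symm
  unfold pvSel
  rw [pvOcc_append, if_neg hx, List.append_nil]

/-- `pvSel` at the appended character. -/
lemma pvSel_append_self (l : List Char) (x : Char) :
    pvSel (l ++ [x]) x = pvSel l x ++
      (if ((l.count x : Nat) : Int) = pvKey x then [(((l.length : Nat) : Int), x)] else []) := by
  unfold pvSel
  rw [pvOcc_append, if_pos rfl]
  have hlen : ((pvOcc l x).length : Int) = (l.count x : Int) := by rw [pvOcc_length]
  have hLapp : ((pvOcc l x ++ [((l.length : Nat) : Int)]).length : Int) = ((pvOcc l x).length : Int) + 1 := by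
    simp
  by_cases h0 : 0 ≤ pvKey x
  · by_cases hlt : pvKey x < ((pvOcc l x).length : Int)
    · -- n < old length: selection unchanged, no new pair
      have hcond : 0 ≤ pvKey x ∧ pvKey x < (((pvOcc l x ++ [((l.length : Nat) : Int)]).length : Nat) : Int) := by
        exact ⟨h0, by omega⟩
      rw [if_pos hcond, if_pos ⟨h0, hlt⟩, if_neg (by omega)]
      rw [List.append_nil]
      have hidx : PySem.List.pyGetD (pvOcc l x ++ [((l.length : Nat) : Int)]) (pvKey x) 0
          = PySem.List.pyGetD (pvOcc l x) (pvKey x) 0 := by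
        rw [PySem.List.pyGetD_eq_getElem _ _ h0 (by omega),
            PySem.List.pyGetD_eq_getElem _ _ h0 hlt,
            List.getElem_append_left (by omega)]
      rw [hidx]
    · by_cases heq : pvKey x = ((pvOcc l x).length : Int)
      · -- n = old length: a new pair appears
        have hcond : 0 ≤ pvKey x ∧ pvKey x < (((pvOcc l x ++ [((l.length : Nat) : Int)]).length : Nat) : Int) := by
          exact ⟨h0, by omega⟩
        rw [if_pos hcond, if_neg (by omega), if_pos (by omega)]
        have hidx : PySem.List.pyGetD (pvOcc l x ++ [((l.length : Nat) : Int)]) (pvKey x) 0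
            = ((l.length : Nat) : Int) := by
          rw [PySem.List.pyGetD_eq_getElem _ _ h0 (by omega)]
          rw [List.getElem_append_right (by omega)]
          simp [show (pvKey x).toNat - (pvOcc l x).length = 0 by omega]
        rw [hidx]; simp
      · -- n past the new length as well
        rw [if_neg (by omega), if_neg (by omega), if_neg (by omega)]
        simp
  · rw [if_neg (by omega), if_neg (by omega), if_neg (by omega)]
    simp

/-- `dedup` under appending one character. -/
lemma pvDedup_append (l : List Char) (x : Char) :
    PySem.List.dedup (l ++ [x]) = if x ∈ l then PySem.List.dedup l else PySem.List.dedup l ++ [x] := by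
  simp only [PySem.List.dedup_eq_ofList, PySem.Set.ofList_eq_foldl, List.foldl_append,
    List.foldl_cons, List.foldl_nil]
  rw [show (List.foldl PySem.Set.add [] l) = PySem.Set.ofList l from (PySem.Set.ofList_eq_foldl l).symm]
  unfold PySem.Set.add
  by_cases h : x ∈ l
  · simp [PySem.Set.contains, PySem.Set.mem_ofList, h]
  · simp [PySem.Set.contains, PySem.Set.mem_ofList, h]

/-- Growing one branch of a flatMap over a nodup list permutes to appending the growth. -/
lemma pvFlatMap_perm {α β : Type} [DecidableEq α] (xs : List α) (f f' : α → List β)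
    (c : α) (e : List β) (hnd : xs.Nodup) (hc : c ∈ xs)
    (hoff : ∀ a ∈ xs, a ≠ c → f' a = f a) (hat : f' c = f c ++ e) :
    (xs.flatMap f').Perm (xs.flatMap f ++ e) := by
  induction xs with
  | nil => cases hc
  | cons a t ih =>
    rcases List.nodup_cons.mp hnd with ⟨hant, hndt⟩
    rw [List.flatMap_cons, List.flatMap_cons]
    rcases List.mem_cons.mp hc with rfl | hct
    · have ht : t.flatMap f' = t.flatMap f :=
        List.flatMap_congr (fun b hb => hoff b (List.mem_cons_of_mem _ hb)
          (fun h => hant (h ▸ hb)))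
      rw [ht, hat, List.append_assoc, List.append_assoc]
      exact List.Perm.append_left _ List.perm_append_comm
    · have hac : a ≠ c := fun h => hant (h ▸ hct)
      rw [hoff a (List.mem_cons_self) hac, List.append_assoc]
      exact List.Perm.append_left _
        (ih hndt hct (fun b hb hbc => hoff b (List.mem_cons_of_mem _ hb) hbc))

/-- Main permutation: the per-character selections are a rearrangement of `pvRef`. -/
lemma pvMain (l : List Char) : ((PySem.List.dedup l).flatMap (pvSel l)).Perm (pvRef l) := by
  induction l using List.reverseRecOn with
  | nil => simp [PySem.List.dedup_eq_ofList, pvRef, PySem.List.enumerate_nil]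
  | append_singleton l x ih =>
    rw [pvRef_append, pvDedup_append]
    by_cases hmem : x ∈ l
    · rw [if_pos hmem]
      have hxd : x ∈ PySem.List.dedup l := by
        rw [PySem.List.dedup_eq_ofList]; exact (PySem.Set.mem_ofList _ _).mpr hmem
      have hperm := pvFlatMap_perm (PySem.List.dedup l) (pvSel l) (pvSel (l ++ [x])) x
        (if ((l.count x : Nat) : Int) = pvKey x then [(((l.length : Nat) : Int), x)] else [])
        (by rw [PySem.List.dedup_eq_ofList]; exact PySem.Set.nodup_ofList l) hxd
        (fun a _ ha => pvSel_append_ne l x a ha) (pvSel_append_self l x)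
      exact hperm.trans (List.Perm.append ih (List.Perm.refl _))
    · rw [if_neg hmem]
      have hcong : (PySem.List.dedup l).flatMap (pvSel (l ++ [x]))
          = (PySem.List.dedup l).flatMap (pvSel l) := by
        apply List.flatMap_congr
        intro a ha
        have hal : a ∈ l := by
          rw [PySem.List.dedup_eq_ofList] at ha; exact (PySem.Set.mem_ofList _ _).mp ha
        exact pvSel_append_ne l x a (fun h => hmem (h ▸ hal))
      rw [List.flatMap_append, List.flatMap_singleton, hcong, pvSel_append_self l x]
      have hsel : pvSel l x = [] := by
        unfold pvSel
        rw [if_neg]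
        intro ⟨h0, h1⟩
        have : (pvOcc l x).length = 0 := by
          unfold pvOcc
          simp only [List.length_map, List.length_eq_zero_iff]
          rw [List.filter_eq_nil_iff]
          intro p hp
          rcases (PySem.List.mem_enumerate_iff _ _ _).mp hp with ⟨k, hk, rfl⟩
          simp only [beq_iff_eq]
          intro h
          exact hmem (h ▸ List.getElem_mem hk)
        omega
      rw [hsel, List.nil_append]
      exact List.Perm.append ih (List.Perm.refl _)

lemma pvRef_pairwise (l : List Char) : (pvRef l).Pairwise (fun a b => a.1 < b.1) :=
  (PySem.List.pairwise_lt_enumerate l 0).sublist List.filter_sublist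

/-- The lookup of the occurrence dictionary of port B. -/
lemma pvDict_getD (l : List Char) (c : Char) :
    ((PySem.List.enumerate l 0).foldl
        (fun (d : PySem.Dict Char (List Int)) p => d.modify p.2 [] (· ++ [p.1]))
        PySem.Dict.empty).getD c [] = pvOcc l c := by
  have hmap := List.foldl_map (f := fun p : Int × Char => (p.2, p.1))
    (g := fun (d : PySem.Dict Char (List Int)) q => d.modify q.1 [] (· ++ [q.2]))
    (l := PySem.List.enumerate l 0) (init := PySem.Dict.empty)
  simp only at hmap
  rw [← hmap, PySem.Dict.getD_foldl_modify_append]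
  rw [List.filter_map, List.map_map]
  unfold pvOcc
  simp [Function.comp_def]

/-- The keys of the occurrence dictionary of port B. -/
lemma pvDict_keys (l : List Char) :
    ((PySem.List.enumerate l 0).foldl
        (fun (d : PySem.Dict Char (List Int)) p => d.modify p.2 [] (· ++ [p.1]))
        PySem.Dict.empty).keys = PySem.List.dedup l := by
  rw [PySem.Dict.keys_foldl_modify_key (PySem.List.enumerate l 0) (fun p => p.2) []
    (fun _ p => (· ++ [p.1])) PySem.Dict.empty]
  rw [PySem.List.map_snd_enumerate, PySem.List.dedup_eq_ofList]
  simp [PySem.Set.update, PySem.Set.ofList_eq_foldl, PySem.Dict.keys_empty]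

lemma pvFilter_map_flatMap (s : List Char) (P : Char → Prop) [DecidablePred P]
    (h : Char → Int × Char) :
    (s.filter (fun c => decide (P c))).map h = s.flatMap (fun c => if P c then [h c] else []) := by
  induction s with
  | nil => rfl
  | cons a t ih =>
    rw [List.filter_cons, List.flatMap_cons, ← ih]
    by_cases hP : P a <;> simp [hP]

/-- The keep-loop of port B computes the flatMap of selections. -/
lemma pvKeep_eq (l : List Char) :
    (((PySem.List.enumerate l 0).foldl
        (fun (d : PySem.Dict Char (List Int)) p => d.modify p.2 [] (· ++ [p.1]))
        PySem.Dict.empty).items.foldl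
      (fun (acc : List (Int × Char)) cp =>
        let n : Int := (cp.1.toNat : Int) - 97
        if 0 ≤ n ∧ n < (cp.2.length : Int) then acc ++ [(PySem.List.pyGetD cp.2 n 0, cp.1)]
        else acc)
      []) = (PySem.List.dedup l).flatMap (pvSel l) := by
  set d := (PySem.List.enumerate l 0).foldl
      (fun (d : PySem.Dict Char (List Int)) p => d.modify p.2 [] (· ++ [p.1]))
      PySem.Dict.empty with hd
  have hnd : d.keys.Nodup := by
    rw [hd]
    exact PySem.Dict.nodup_keys_foldl_modify_key (PySem.List.enumerate l 0) (fun p => p.2) []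
      (fun _ p => (· ++ [p.1])) PySem.Dict.empty (by simp [PySem.Dict.keys_empty])
  have hitems : d.items = (PySem.List.dedup l).map (fun c => (c, pvOcc l c)) := by
    rw [PySem.Dict.items_eq_map_keys d hnd [], hd, pvDict_keys]
    exact List.map_congr_left (fun c _ => by rw [pvDict_getD])
  rw [PySem.List.foldl_append_ite
    (p := fun cp : Char × List Int => 0 ≤ (cp.1.toNat : Int) - 97 ∧ (cp.1.toNat : Int) - 97 < (cp.2.length : Int))
    (f := fun cp : Char × List Int => (PySem.List.pyGetD cp.2 ((cp.1.toNat : Int) - 97) 0, cp.1))]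
  rw [List.nil_append, hitems, List.filter_map, List.map_map]
  simp only [Function.comp_def]
  simp only [show ∀ x : Char, (x.toNat : Int) - 97 = pvKey x from fun _ => rfl]
  rw [pvFilter_map_flatMap (PySem.List.dedup l)
    (P := fun c => 0 ≤ pvKey c ∧ pvKey c < ((pvOcc l c).length : Int))
    (h := fun c => (PySem.List.pyGetD (pvOcc l c) (pvKey c) 0, c))]
  exact List.flatMap_congr (fun c _ => by unfold pvSel; rfl)

lemma fubarer_eq_alt (inp : String) : fubarer inp = fubarer_alt inp := by
  unfold fubarer fubarer_alt
  rw [fubarerA_loop inp.toList PySem.Dict.empty [] []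
      (by intro c; simp [PySem.Dict.getD_empty])]
  show String.mk ([] ++ pvGo [] inp.toList) = _
  simp only []
  rw [pvKeep_eq]
  have hsorted : PySem.List.sorted ((PySem.List.dedup inp.toList).flatMap (pvSel inp.toList))
      (fun t : Int × Char => t.1) false = pvRef inp.toList :=
    PySem.List.sorted_eq_of_perm_of_pairwise_lt _ _ (fun t : Int × Char => t.1)
      (pvMain inp.toList).symm (pvRef_pairwise inp.toList)
  rw [hsorted]
  have h0 : pvRef inp.toList
      = (PySem.List.enumerate inp.toList ((([] : List Char).length : Nat) : Int)).filter
        (fun p => ((PySem.List.slice inp.toList none (some p.1)).count p.2 : Int) == pvKey p.2) := by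
    unfold pvRef
    norm_num
  rw [h0, fubarerRef_loop inp.toList inp.toList [] (by simp)]
  simp

-- ===== VERDICT (by name: the statement is the Claim_ definition above) =====
theorem fubarer_spec : Claim_equal_fubarer := by
  intro inp _
  unfold Spec_fubarer
  exact fubarer_eq_alt inp
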